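-- pv_equiv track=rewrite | github.com/asweigart/programmedpatterns | book/visualpatterns.py | pattern59
-- ===== SOURCE A (Python) =====
-- def pattern59(step):
--     width = 4
--     height = 2
--     for i in range(2, step + 1):
--         if i % 2 == 0:
--             width += 2
--             height += 1
--         else:
--             width += 2
--             height += 2
--     row = ('O' * width) + '\n'
--     pattern = row * height
--     return pattern
-- ===== SOURCE B (Python) =====
-- def pattern59(step):
--     s = max(step, 1)
--     width = 2 * s + 2
--     height = 2 * s - s // 2
--     return ('O' * width + '\n') * height
-- ===== Notes on version B (the rewrite author's own statement) =====
-- stated objective: simpler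
-- what changed: Replaces the accumulation loop over range(2, step+1) with closed-form arithmetic: width = 2*s+2 and height = 2*s - s//2 for s = max(step, 1), then builds the string by repetition.
import Mathlib
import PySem

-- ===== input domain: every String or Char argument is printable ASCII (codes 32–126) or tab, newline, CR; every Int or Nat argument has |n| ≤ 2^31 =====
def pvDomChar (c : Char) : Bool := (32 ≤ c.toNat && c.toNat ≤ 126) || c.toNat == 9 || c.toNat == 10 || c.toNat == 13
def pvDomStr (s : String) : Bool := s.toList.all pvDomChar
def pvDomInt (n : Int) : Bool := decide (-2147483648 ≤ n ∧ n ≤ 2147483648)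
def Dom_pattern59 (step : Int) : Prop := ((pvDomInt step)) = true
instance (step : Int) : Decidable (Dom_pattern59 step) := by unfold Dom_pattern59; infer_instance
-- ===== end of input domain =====

-- B replaces A's accumulation loop by closed-form width/height arithmetic (simpler, same output).

-- ===== PORT A =====
def pattern59 (step : Int) : String :=
  let wh := (PySem.List.pyRange 2 (step + 1) 1).foldl
    (fun (s : Int × Int) i =>
      if PySem.Int.mod i 2 = 0 then (s.1 + 2, s.2 + 1) else (s.1 + 2, s.2 + 2))
    (4, 2)
  let row := PySem.List.pyRepeat ['O'] wh.1 ++ ['\n']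
  String.ofList (PySem.List.pyRepeat row wh.2)

-- ===== PORT B =====
def pattern59_alt (step : Int) : String :=
  let s := max step 1
  let width := 2 * s + 2
  let height := 2 * s - PySem.Int.floordiv s 2
  String.ofList (PySem.List.pyRepeat (PySem.List.pyRepeat ['O'] width ++ ['\n']) height)

-- ===== PRECONDITION & SPEC =====
def Spec_pattern59 (step : Int) (out : String) : Prop := out = pattern59_alt step
instance (step : Int) (out : String) : Decidable (Spec_pattern59 step out) := by unfold Spec_pattern59; infer_instance

-- ===== CLAIM (what is proved, stated in full; the proofs are below) =====
def Claim_equal_pattern59 : Prop := ∀ (step : Int), Dom_pattern59 step → Spec_pattern59 step (pattern59 step)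

-- ===== LEMMAS AND PROOFS =====

-- The loop's accumulator after running over range(2, 2+m) in closed form.
lemma pattern59_fold_eq (m : Nat) :
    (PySem.List.pyRange 2 (2 + (m : Int)) 1).foldl
      (fun (s : Int × Int) i =>
        if PySem.Int.mod i 2 = 0 then (s.1 + 2, s.2 + 1) else (s.1 + 2, s.2 + 2))
      (4, 2)
    = (4 + 2 * (m : Int), 2 + (m : Int) + (m : Int) / 2) := by
  induction m with
  | zero =>
      rw [show (2 + ((0 : Nat) : Int)) = 2 by norm_num, PySem.List.pyRange_one_eq_nil le_rfl]
      simp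
  | succ k ih =>
      have h : (2 : Int) + ((k + 1 : Nat) : Int) = (2 + (k : Int)) + 1 := by push_cast; ring
      have hmod : PySem.Int.mod (2 + (k : Int)) 2 = (2 + (k : Int)) % 2 := by
        simp [PySem.Int.mod, Int.fmod_eq_emod]
      rw [h, PySem.List.pyRange_one_succ_right (by omega), List.foldl_append, ih]
      simp only [List.foldl_cons, List.foldl_nil, hmod]
      have hk : ((k + 1 : Nat) : Int) = (k : Int) + 1 := by push_cast; ring
      by_cases he : (2 + (k : Int)) % 2 = 0
      · rw [if_pos he]
        refine Prod.ext ?_ ?_ <;> simp [hk] <;> omega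
      · rw [if_neg he]
        refine Prod.ext ?_ ?_ <;> simp [hk] <;> omega

-- ===== VERDICT (by name: the statement is the Claim_ definition above) =====
theorem pattern59_spec : Claim_equal_pattern59 := by
  intro step _
  unfold Spec_pattern59 pattern59 pattern59_alt
  by_cases h : step ≤ 1
  · rw [PySem.List.pyRange_one_eq_nil (by omega)]
    have hmax : max step 1 = 1 := by omega
    simp [hmax, PySem.Int.floordiv]
  · rw [not_le] at h
    have hmax : max step 1 = step := by omega
    obtain ⟨m, hm⟩ : ∃ m : Nat, step + 1 = 2 + (m : Int) := ⟨(step - 1).toNat, by omega⟩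
    rw [hm, pattern59_fold_eq]
    have hfd : PySem.Int.floordiv step 2 = (m : Int) / 2 + ((m : Int) % 2 + 1) / 2 := by
      rw [PySem.Int.floordiv_eq_iff_of_pos (by norm_num)]
      constructor <;> omega
    simp only [hmax, hfd]
    have hw : 2 * step + 2 = 4 + 2 * (m : Int) := by omega
    have hh : 2 * step - ((m : Int) / 2 + ((m : Int) % 2 + 1) / 2) = 2 + (m : Int) + (m : Int) / 2 := by
      omega
    rw [hw, hh]
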